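-- pv_equiv track=rewrite | github.com/therealZpoint-bot/conversation-search-mcp | conversation_search.py | _derive_project_name
-- ===== SOURCE A (Python) =====
-- def _derive_project_name(dir_name: str, all_dir_names: list[str]) -> str:
--     """Derive a human-readable project name from an encoded directory name.
--
--     Strips the common prefix shared by all directories, leaving the
--     project-specific suffix.
--     """
--     if not all_dir_names:
--         return dir_name
--
--     if len(all_dir_names) == 1:
--         # Single directory — use last meaningful segments
--         parts = dir_name.split("-")
--         # Find non-empty parts from the end
--         meaningful = [p for p in parts if p]
--         if len(meaningful) >= 2:
--             return "-".join(meaningful[-2:])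
--         return dir_name
--
--     # Find common prefix across all directory names
--     segments_list = [name.split("-") for name in all_dir_names]
--     min_len = min(len(s) for s in segments_list)
--     common_len = 0
--     for i in range(min_len):
--         if all(s[i] == segments_list[0][i] for s in segments_list):
--             common_len = i + 1
--         else:
--             break
--
--     parts = dir_name.split("-")
--     suffix_parts = parts[common_len:]
--     result = "-".join(suffix_parts)
--     return result if result else dir_name
-- ===== SOURCE B (Python) =====
-- def _derive_project_name(dir_name: str, all_dir_names: list[str]) -> str:
--     """Derive a human-readable project name from an encoded directory name."""
--     if not all_dir_names:
--         return dir_name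
--
--     if len(all_dir_names) == 1:
--         # Single directory - use last meaningful segments
--         meaningful = [p for p in dir_name.split("-") if p]
--         return "-".join(meaningful[-2:]) if len(meaningful) >= 2 else dir_name
--
--     # Common prefix by pairwise folding: shrink the running prefix against
--     # each further name, cutting at the first mismatching segment.
--     first, *rest = all_dir_names
--     prefix = first.split("-")
--     for name in rest:
--         prefix = _common_segments(prefix, name.split("-"))
--
--     suffix = "-".join(dir_name.split("-")[len(prefix):])
--     return suffix if suffix else dir_name
--
--
-- def _common_segments(a: list[str], b: list[str]) -> list[str]:
--     out = []
--     for x, y in zip(a, b):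
--         if x != y:
--             break
--         out.append(x)
--     return out
-- ===== Notes on version B (the rewrite author's own statement) =====
-- stated objective: alternative
-- what changed: The multi-directory common prefix is computed by folding a pairwise common-segment-prefix function over the names (list-structural recursion per pair) instead of A's index-synchronous scan over range(min_len) with an all(...) inner pass at each index.
import Mathlib
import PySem

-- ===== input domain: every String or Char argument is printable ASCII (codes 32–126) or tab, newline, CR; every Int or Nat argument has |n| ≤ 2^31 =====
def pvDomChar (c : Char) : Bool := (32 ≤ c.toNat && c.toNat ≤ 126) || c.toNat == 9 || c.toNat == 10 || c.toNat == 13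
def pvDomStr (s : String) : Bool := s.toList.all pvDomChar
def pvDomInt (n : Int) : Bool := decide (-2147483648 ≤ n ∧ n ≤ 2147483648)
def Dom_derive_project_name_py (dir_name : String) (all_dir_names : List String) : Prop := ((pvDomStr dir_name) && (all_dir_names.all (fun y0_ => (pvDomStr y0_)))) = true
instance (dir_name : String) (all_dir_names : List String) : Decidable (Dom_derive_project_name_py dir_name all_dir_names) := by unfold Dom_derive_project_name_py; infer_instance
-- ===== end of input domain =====

-- B replaces A's index-synchronous common-prefix scan (range(min_len) with an all(...) pass
-- per index) by a fold of a pairwise common-segment-prefix over the names; same return value.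

-- s.split("-"): separator "-" ≠ "", so PySem.Str.split? is always `some`; exact
def pvSplitDash (s : String) : List String := (PySem.Str.split? s "-").getD []

-- ===== PORT A =====
-- all(s[i] == segments_list[0][i] for s in segments_list); i < min_len keeps every index in range
def pvAAllEq (segs : List (List String)) (s0 : List String) (i : Int) : Bool :=
  segs.all (fun s => PySem.List.pyGetD s i "" == PySem.List.pyGetD s0 i "")

-- the 'for i in range(min_len): … else: break' loop; accumulator = common_len
def pvALoop (segs : List (List String)) (s0 : List String) : List Int → Nat → Nat
  | [], common => common
  | i :: rest, common =>
      if pvAAllEq segs s0 i then pvALoop segs s0 rest (i.toNat + 1) else common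

def derive_project_name_py (dir_name : String) (all_dir_names : List String) : String :=
  if all_dir_names.length = 0 then dir_name
  else if all_dir_names.length = 1 then
    let parts := pvSplitDash dir_name
    let meaningful := parts.filter (fun p => p != "")
    if 2 ≤ meaningful.length then
      PySem.Str.join "-" (PySem.List.slice meaningful (some (-2)) none)
    else dir_name
  else
    let segsList := all_dir_names.map pvSplitDash
    let minLen : Nat :=
      match segsList.map List.length with
      | [] => 0            -- unreachable: len(all_dir_names) ≥ 2 here
      | x :: t => t.foldl min x
    let commonLen := pvALoop segsList (PySem.List.pyGetD segsList 0 [])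
        (PySem.List.pyRange 0 (minLen : Int) 1) 0
    let suffixParts := PySem.List.slice (pvSplitDash dir_name) (some (commonLen : Int)) none
    let result := PySem.Str.join "-" suffixParts
    if result != "" then result else dir_name

-- ===== PORT B =====
-- _common_segments: leading segments on which a and b agree, cut at the first mismatch
def pvCommonSegments (a b : List String) : List String :=
  match a, b with
  | x :: xs, y :: ys => if x == y then x :: pvCommonSegments xs ys else []
  | _, _ => []

def derive_project_name_py_alt (dir_name : String) (all_dir_names : List String) : String :=
  match all_dir_names with
  | [] => dir_name
  | [_] =>
    let meaningful := (pvSplitDash dir_name).filter (fun p => p != "")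
    if 2 ≤ meaningful.length then
      PySem.Str.join "-" (PySem.List.slice meaningful (some (-2)) none)
    else dir_name
  | first :: rest =>
    let pre := rest.foldl (fun p name => pvCommonSegments p (pvSplitDash name)) (pvSplitDash first)
    let suffix := PySem.Str.join "-" ((pvSplitDash dir_name).drop pre.length)
    if suffix != "" then suffix else dir_name

-- ===== PRECONDITION & SPEC =====
def Spec_derive_project_name_py (dir_name : String) (all_dir_names : List String) (out : String) : Prop := out = derive_project_name_py_alt dir_name all_dir_names
instance (dir_name : String) (all_dir_names : List String) (out : String) : Decidable (Spec_derive_project_name_py dir_name all_dir_names out) := by unfold Spec_derive_project_name_py; infer_instance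

-- ===== CLAIM (what is proved, stated in full; the proofs are below) =====
def Claim_equal_derive_project_name_py : Prop := ∀ (dir_name : String) (all_dir_names : List String), Dom_derive_project_name_py dir_name all_dir_names → Spec_derive_project_name_py dir_name all_dir_names (derive_project_name_py dir_name all_dir_names)

-- ===== LEMMAS AND PROOFS =====

-- unfolding equations for the ports' loops
lemma pvALoop_cons (segs : List (List String)) (s0 : List String) (i : Int)
    (rest : List Int) (c : Nat) :
    pvALoop segs s0 (i :: rest) c =
      if pvAAllEq segs s0 i then pvALoop segs s0 rest (i.toNat + 1) else c := rfl

-- proof-side counter mirroring A's loop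
def pvCnt (C : Nat → Bool) : Nat → Nat → Nat
  | i, 0 => i
  | i, m + 1 => if C i then pvCnt C (i + 1) m else i

lemma pvCnt_succ (C : Nat → Bool) (i m : Nat) :
    pvCnt C i (m + 1) = if C i then pvCnt C (i + 1) m else i := rfl

-- ≤-characterisation of the pairwise common prefix length
lemma pv_cs_le_iff (a : List String) : ∀ (b : List String) (k : Nat),
    k ≤ (pvCommonSegments a b).length ↔
      k ≤ a.length ∧ k ≤ b.length ∧ ∀ j, j < k → b.getD j "" = a.getD j "" := by
  induction a with
  | nil =>
    intro b k
    constructor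
    · intro h; simp [pvCommonSegments] at h; subst h; simp
    · intro ⟨h, _⟩; simpa [pvCommonSegments] using h
  | cons x xs ih =>
    intro b k
    cases b with
    | nil =>
      constructor
      · intro h; simp [pvCommonSegments] at h; subst h; simp
      · intro ⟨_, h, _⟩; simpa [pvCommonSegments] using h
    | cons y ys =>
      by_cases hxy : x = y
      · cases k with
        | zero => simp
        | succ k' =>
          have hih := ih ys k'
          simp only [pvCommonSegments, hxy, beq_self_eq_true, if_true, List.length_cons,
            Nat.succ_le_succ_iff]
          rw [hih]
          constructor
          · rintro ⟨h1, h2, h3⟩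
            refine ⟨h1, h2, ?_⟩
            intro j hj
            cases j with
            | zero => simp
            | succ j' => simpa using h3 j' (by omega)
          · rintro ⟨h1, h2, h3⟩
            exact ⟨h1, h2, fun j hj => by simpa using h3 (j + 1) (by omega)⟩
      · constructor
        · intro h
          simp [pvCommonSegments, hxy] at h
          subst h; simp
        · rintro ⟨_, _, h3⟩
          cases k with
          | zero => simp
          | succ k' => exact absurd (h3 0 (by omega)) (by simpa using fun h => hxy h.symm)

-- the common prefix reads back a's entries
lemma pv_cs_getD (a : List String) : ∀ (b : List String) (j : Nat),
    j < (pvCommonSegments a b).length → (pvCommonSegments a b).getD j "" = a.getD j "" := by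
  induction a with
  | nil => intro b j h; simp [pvCommonSegments] at h
  | cons x xs ih =>
    intro b j h
    cases b with
    | nil => simp [pvCommonSegments] at h
    | cons y ys =>
      by_cases hxy : x = y
      · simp only [pvCommonSegments, hxy, beq_self_eq_true, if_true] at h ⊢
        cases j with
        | zero => simp
        | succ j' => simpa using ih ys j' (by simpa using h)
      · simp [pvCommonSegments, hxy] at h

-- ≤-characterisation of B's fold of pairwise common prefixes
lemma pv_foldB_le_iff (ss : List (List String)) : ∀ (a0 : List String) (k : Nat),
    k ≤ (ss.foldl pvCommonSegments a0).length ↔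
      k ≤ a0.length ∧ ∀ s ∈ ss, k ≤ s.length ∧ ∀ j, j < k → s.getD j "" = a0.getD j "" := by
  induction ss with
  | nil => intro a0 k; simp
  | cons n t ih =>
    intro a0 k
    rw [List.foldl_cons, ih]
    constructor
    · rintro ⟨h1, h2⟩
      obtain ⟨ha0, hn, heq⟩ := (pv_cs_le_iff a0 n k).mp h1
      refine ⟨ha0, ?_⟩
      intro s hs
      rcases List.mem_cons.mp hs with rfl | hs'
      · exact ⟨hn, heq⟩
      · obtain ⟨hl, he⟩ := h2 s hs'
        exact ⟨hl, fun j hj => by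
          rw [he j hj, pv_cs_getD a0 n j (lt_of_lt_of_le hj h1)]⟩
    · rintro ⟨ha0, h⟩
      obtain ⟨hn, heqn⟩ := h n (List.mem_cons_self ..)
      have h1 : k ≤ (pvCommonSegments a0 n).length :=
        (pv_cs_le_iff a0 n k).mpr ⟨ha0, hn, heqn⟩
      refine ⟨h1, ?_⟩
      intro s hs
      obtain ⟨hl, he⟩ := h s (List.mem_cons_of_mem _ hs)
      exact ⟨hl, fun j hj => by
        rw [he j hj, pv_cs_getD a0 n j (lt_of_lt_of_le hj h1)]⟩

-- ≤-characterisation of min over a list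
lemma pv_foldl_min_le_iff (l : List Nat) : ∀ (b k : Nat),
    k ≤ l.foldl min b ↔ k ≤ b ∧ ∀ x ∈ l, k ≤ x := by
  induction l with
  | nil => intro b k; simp
  | cons x t ih =>
    intro b k
    rw [List.foldl_cons, ih]
    constructor
    · rintro ⟨h1, h3⟩
      rw [le_min_iff] at h1
      refine ⟨h1.1, fun y hy => ?_⟩
      rcases List.mem_cons.mp hy with rfl | hy'
      · exact h1.2
      · exact h3 y hy'
    · rintro ⟨h1, h2⟩
      exact ⟨le_min_iff.mpr ⟨h1, h2 x (List.mem_cons_self ..)⟩,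
        fun y hy => h2 y (List.mem_cons_of_mem _ hy)⟩

lemma pv_aloop_eq_cnt (segs : List (List String)) (s0 : List String) :
    ∀ (m i : Nat),
      pvALoop segs s0 (List.map (fun (k : Nat) => (k : Int)) (List.range' i m)) i =
        pvCnt (fun j => segs.all (fun s => s.getD j "" == s0.getD j "")) i m := by
  intro m
  induction m with
  | zero => intro i; rfl
  | succ m ih =>
    intro i
    rw [List.range'_succ, List.map_cons, pvALoop_cons, pvCnt_succ]
    have hcond : pvAAllEq segs s0 ((i : Nat) : Int) =
        segs.all (fun s => s.getD i "" == s0.getD i "") := by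
      simp [pvAAllEq, PySem.List.pyGetD_natCast]
    rw [hcond]
    by_cases h : segs.all (fun s => s.getD i "" == s0.getD i "") = true
    · rw [if_pos h, if_pos h, Int.toNat_natCast]
      exact ih (i + 1)
    · rw [if_neg h, if_neg h]

lemma pv_le_cnt (C : Nat → Bool) : ∀ (m i : Nat), i ≤ pvCnt C i m := by
  intro m
  induction m with
  | zero => intro i; exact le_refl i
  | succ m ih =>
    intro i
    rw [pvCnt_succ]
    split
    · exact le_trans (Nat.le_succ i) (ih (i + 1))
    · exact le_refl i

lemma pv_cnt_le_iff (C : Nat → Bool) : ∀ (m i k : Nat),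
    i + k ≤ pvCnt C i m ↔ k ≤ m ∧ ∀ j, j < k → C (i + j) = true := by
  intro m
  induction m with
  | zero =>
    intro i k
    constructor
    · intro h
      simp only [pvCnt] at h
      exact ⟨by omega, fun j hj => absurd hj (by omega)⟩
    · rintro ⟨h, _⟩
      simp only [pvCnt]
      omega
  | succ m ih =>
    intro i k
    rw [pvCnt_succ]
    by_cases hC : C i = true
    · rw [if_pos hC]
      cases k with
      | zero =>
        constructor
        · intro _; exact ⟨by omega, fun j hj => absurd hj (by omega)⟩
        · intro _
          have := pv_le_cnt C m (i + 1)
          omega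
      | succ k' =>
        rw [show i + (k' + 1) = (i + 1) + k' by omega, ih (i + 1) k']
        constructor
        · rintro ⟨h1, h2⟩
          refine ⟨by omega, ?_⟩
          intro j hj
          cases j with
          | zero => simpa using hC
          | succ j' =>
            have := h2 j' (by omega)
            rwa [show i + (j' + 1) = i + 1 + j' by omega]
        · rintro ⟨h1, h2⟩
          refine ⟨by omega, ?_⟩
          intro j hj
          have := h2 (j + 1) (by omega)
          rwa [show i + 1 + j = i + (j + 1) by omega]
    · rw [if_neg hC]
      constructor
      · intro h
        have hk : k = 0 := by omega
        subst hk
        exact ⟨by omega, fun j hj => absurd hj (by omega)⟩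
      · rintro ⟨h1, h2⟩
        cases k with
        | zero => omega
        | succ k' => exact absurd (by simpa using h2 0 (by omega)) hC

-- the core: A's common_len equals the length of B's folded common prefix
lemma pv_common_eq (a0 : List String) (ss : List (List String)) :
    pvALoop (a0 :: ss) a0
        (PySem.List.pyRange 0 (((ss.map List.length).foldl min a0.length : Nat) : Int) 1) 0 =
      (ss.foldl pvCommonSegments a0).length := by
  rw [PySem.List.pyRange_zero_natCast, List.range_eq_range', pv_aloop_eq_cnt]
  set C : Nat → Bool := fun j => ((a0 :: ss).all fun s => s.getD j "" == a0.getD j "") with hC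
  set M : Nat := (ss.map List.length).foldl min a0.length with hM
  set B' : Nat := (ss.foldl pvCommonSegments a0).length with hB
  apply le_antisymm
  · obtain ⟨hkM, hall⟩ := (pv_cnt_le_iff C M 0 (pvCnt C 0 M)).mp (by omega)
    apply (pv_foldB_le_iff ss a0 (pvCnt C 0 M)).mpr
    have hmin := (pv_foldl_min_le_iff (ss.map List.length) a0.length (pvCnt C 0 M)).mp hkM
    refine ⟨hmin.1, fun s hs => ⟨hmin.2 s.length (List.mem_map_of_mem hs), fun j hj => ?_⟩⟩
    have h := hall j hj
    rw [Nat.zero_add, hC] at h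
    simp only [List.all_cons, List.all_eq_true, Bool.and_eq_true, beq_iff_eq] at h
    exact h.2 s hs
  · obtain ⟨ha0, hfacts⟩ := (pv_foldB_le_iff ss a0 B').mp (le_refl B')
    have hM' : B' ≤ M := by
      rw [hM]
      apply (pv_foldl_min_le_iff (ss.map List.length) a0.length B').mpr
      refine ⟨ha0, fun x hx => ?_⟩
      obtain ⟨s, hs, rfl⟩ := List.mem_map.mp hx
      exact (hfacts s hs).1
    have h := (pv_cnt_le_iff C M 0 B').mpr ⟨hM', ?_⟩
    · omega
    · intro j hj
      rw [Nat.zero_add, hC]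
      simp only [List.all_cons, List.all_eq_true, Bool.and_eq_true, beq_iff_eq]
      exact ⟨trivial, fun s hs => (hfacts s hs).2 j hj⟩

-- the same, with the second directory's segments exposed (the shape the goal takes)
lemma pv_common_eq' (a0 s1 : List String) (ss : List (List String)) :
    pvALoop (a0 :: s1 :: ss) a0
        (PySem.List.pyRange 0
          (((ss.map List.length).foldl min (min a0.length s1.length) : Nat) : Int) 1) 0 =
      ((s1 :: ss).foldl pvCommonSegments a0).length := by
  have h := pv_common_eq a0 (s1 :: ss)
  simpa using h

-- the multi-directory branch
lemma pv_multi_eq (dn first r0 : String) (rs : List String) :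
    derive_project_name_py dn (first :: r0 :: rs) =
      derive_project_name_py_alt dn (first :: r0 :: rs) := by
  have hlen0 : (first :: r0 :: rs).length ≠ 0 := by simp
  have hlen1 : (first :: r0 :: rs).length ≠ 1 := by simp
  unfold derive_project_name_py derive_project_name_py_alt
  rw [if_neg hlen0, if_neg hlen1]
  simp only [List.map_cons, PySem.List.pyGetD_zero_cons, List.foldl_cons]
  rw [pv_common_eq', PySem.List.slice_from_natCast, List.foldl_cons, List.foldl_map]

-- ===== VERDICT (by name: the statement is the Claim_ definition above) =====
theorem derive_project_name_py_spec : Claim_equal_derive_project_name_py := by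
  intro dir_name all_dir_names _
  unfold Spec_derive_project_name_py
  match all_dir_names with
  | [] => rfl
  | [x] => rfl
  | first :: r0 :: rs => exact pv_multi_eq dir_name first r0 rs
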